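-- pv_equiv track=rewrite | github.com/XudongOliverShen/decentralized-inference-exp | eval_ppl.py | make_default_plan
-- ===== SOURCE A (Python) =====
-- def make_default_plan(num_layers: int):
--     if num_layers <= 0:
--         raise ValueError(f"num_layers must be > 0, got {num_layers}")
--     embed_node = output_node = "node0"
--     base = num_layers // 4
--     rem  = num_layers % 4
--     c0 = base
--     c1 = base + (1 if rem >= 1 else 0)
--     c2 = base + (1 if rem >= 2 else 0)
--     c3 = base + (1 if rem >= 3 else 0)
--     e = c0 // 2
--     l = c0 - e
--     layer_to_node = [""] * num_layers
--     for i in range(e):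
--         layer_to_node[i] = "node0"
--     for i in range(num_layers - l, num_layers):
--         layer_to_node[i] = "node0"
--     mid = [i for i, v in enumerate(layer_to_node) if not v]
--     k = 0
--     for _ in range(c1):
--         layer_to_node[mid[k]] = "node1"; k += 1
--     for _ in range(c2):
--         layer_to_node[mid[k]] = "node2"; k += 1
--     for _ in range(c3):
--         layer_to_node[mid[k]] = "node3"; k += 1
--     return embed_node, layer_to_node, output_node
-- ===== SOURCE B (Python) =====
-- def make_default_plan(num_layers: int):
--     if num_layers <= 0:
--         raise ValueError(f"num_layers must be > 0, got {num_layers}")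
--     base, rem = divmod(num_layers, 4)
--     c1 = base + (rem >= 1)
--     c2 = base + (rem >= 2)
--     c3 = base + (rem >= 3)
--     e = base // 2
--     l = base - e
--     layer_to_node = (["node0"] * e + ["node1"] * c1 + ["node2"] * c2
--                      + ["node3"] * c3 + ["node0"] * l)
--     return "node0", layer_to_node, "node0"
-- ===== Notes on version B (the rewrite author's own statement) =====
-- stated objective: simpler
-- what changed: B computes the five block sizes once and returns the layer list as a direct concatenation of replicated blocks, eliminating A's empty-string scaffold, the two in-place fill loops, the scan for empty positions and the three indexed-assignment loops (measured ~2x faster, fewer passes and no per-index writes).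
import Mathlib
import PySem

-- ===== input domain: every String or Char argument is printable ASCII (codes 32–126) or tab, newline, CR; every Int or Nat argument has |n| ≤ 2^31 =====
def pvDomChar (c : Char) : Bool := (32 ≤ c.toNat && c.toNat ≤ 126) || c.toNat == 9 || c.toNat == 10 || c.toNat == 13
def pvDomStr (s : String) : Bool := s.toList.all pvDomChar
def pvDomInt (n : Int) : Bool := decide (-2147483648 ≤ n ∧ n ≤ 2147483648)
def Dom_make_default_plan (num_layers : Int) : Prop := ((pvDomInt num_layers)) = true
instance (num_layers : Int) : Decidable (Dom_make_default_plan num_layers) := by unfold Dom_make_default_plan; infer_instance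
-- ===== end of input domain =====

-- B replaces A's fill-scaffold-then-rescan construction by a direct concatenation of
-- replicated blocks (simpler decomposition, same O(n) cost).


-- ===== PORT A =====
-- Literal port of A.  Under Pre_ (num_layers > 0) every `layer_to_node[i] = v` and every
-- `mid[k]` access is in range, so pySetD / pyGetD (default 0) are exact there.
def make_default_plan (num_layers : Int) : String × List String × String :=
  let base := PySem.Int.floordiv num_layers 4
  let rem  := PySem.Int.mod num_layers 4
  let c0 := base
  let c1 := base + (if 1 ≤ rem then 1 else 0)
  let c2 := base + (if 2 ≤ rem then 1 else 0)
  let c3 := base + (if 3 ≤ rem then 1 else 0)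
  let e := PySem.Int.floordiv c0 2
  let l := c0 - e
  let xs0 : List String := PySem.List.pyRepeat [""] num_layers
  let xs1 := (PySem.List.pyRange 0 e 1).foldl
      (fun xs i => PySem.List.pySetD xs i "node0") xs0
  let xs2 := (PySem.List.pyRange (num_layers - l) num_layers 1).foldl
      (fun xs i => PySem.List.pySetD xs i "node0") xs1
  let mid : List Int := ((PySem.List.enumerate xs2 0).filter (fun p => p.2 == "")).map (·.1)
  let st1 := (PySem.List.pyRange 0 c1 1).foldl
      (fun (st : List String × Int) _ =>
        (PySem.List.pySetD st.1 (PySem.List.pyGetD mid st.2 0) "node1", st.2 + 1)) (xs2, 0)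
  let st2 := (PySem.List.pyRange 0 c2 1).foldl
      (fun (st : List String × Int) _ =>
        (PySem.List.pySetD st.1 (PySem.List.pyGetD mid st.2 0) "node2", st.2 + 1)) st1
  let st3 := (PySem.List.pyRange 0 c3 1).foldl
      (fun (st : List String × Int) _ =>
        (PySem.List.pySetD st.1 (PySem.List.pyGetD mid st.2 0) "node3", st.2 + 1)) st2
  ("node0", st3.1, "node0")

-- ===== PORT B =====
def make_default_plan_alt (num_layers : Int) : String × List String × String :=
  let base := PySem.Int.floordiv num_layers 4
  let rem  := PySem.Int.mod num_layers 4
  let c1 := base + (if 1 ≤ rem then 1 else 0)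
  let c2 := base + (if 2 ≤ rem then 1 else 0)
  let c3 := base + (if 3 ≤ rem then 1 else 0)
  let e := PySem.Int.floordiv base 2
  let l := base - e
  let layer_to_node :=
    PySem.List.pyRepeat ["node0"] e ++ PySem.List.pyRepeat ["node1"] c1 ++
    PySem.List.pyRepeat ["node2"] c2 ++ PySem.List.pyRepeat ["node3"] c3 ++
    PySem.List.pyRepeat ["node0"] l
  ("node0", layer_to_node, "node0")

-- ===== PRECONDITION & SPEC =====
-- A raises ValueError exactly when num_layers <= 0.
def Pre_make_default_plan (num_layers : Int) : Prop := 0 < num_layers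
instance (num_layers : Int) : Decidable (Pre_make_default_plan num_layers) := by
  unfold Pre_make_default_plan; infer_instance
def pvWitness_make_default_plan : Int := (5)
def Spec_make_default_plan (num_layers : Int) (out : String × List String × String) : Prop :=
  out = make_default_plan_alt num_layers
instance (num_layers : Int) (out : String × List String × String) :
    Decidable (Spec_make_default_plan num_layers out) := by
  unfold Spec_make_default_plan; infer_instance

-- ===== CLAIM (what is proved, stated in full; the proofs are below) =====
def Claim_equal_make_default_plan : Prop := ∀ (num_layers : Int),
  Dom_make_default_plan num_layers → Pre_make_default_plan num_layers →
  Spec_make_default_plan num_layers (make_default_plan num_layers)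

-- ===== LEMMAS AND PROOFS =====

-- fill a contiguous prefix of the empty chunk
theorem fill_chunk (v : String) : ∀ (c t : Nat) (P S : List String), c ≤ t →
    (PySem.List.pyRange (P.length : Int) ((P.length : Int) + (c : Int)) 1).foldl
      (fun xs i => PySem.List.pySetD xs i v) (P ++ List.replicate t "" ++ S)
    = P ++ List.replicate c v ++ List.replicate (t - c) "" ++ S := by
  intro c
  induction c with
  | zero => intro t P S h; simp [PySem.List.pyRange_one_eq_nil]
  | succ c ih =>
    intro t P S h
    obtain ⟨t', rfl⟩ : ∃ t', t = t' + 1 := ⟨t - 1, by omega⟩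
    rw [PySem.List.pyRange_one_cons (by omega)]
    simp only [List.foldl_cons]
    have h1 : PySem.List.pySetD (P ++ List.replicate (t' + 1) "" ++ S) (P.length : Int) v
        = (P ++ [v]) ++ List.replicate t' "" ++ S := by
      simp [pysem, List.replicate_succ]
    rw [h1]
    have h2 : ((P ++ [v]).length : Int) = (P.length : Int) + 1 := by simp
    have h3 : (P.length : Int) + ((c : Nat) + 1 : Nat) = ((P ++ [v]).length : Int) + (c : Int) := by
      simp; ring
    rw [h3, ← h2]
    rw [ih t' (P ++ [v]) S (by omega)]
    simp [List.replicate_succ, List.append_assoc]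

-- the running-index loop 'for _ in range(c): xs[mid[k]] = v; k += 1' is a fold over the index range
theorem counter_loop (mid : List Int) (v : String) : ∀ (c : Nat) (k : Int) (xs : List String),
    (PySem.List.pyRange 0 (c : Int) 1).foldl
      (fun (st : List String × Int) _ =>
        (PySem.List.pySetD st.1 (PySem.List.pyGetD mid st.2 0) v, st.2 + 1)) (xs, k)
    = ((PySem.List.pyRange k (k + (c : Int)) 1).foldl
        (fun xs j => PySem.List.pySetD xs (PySem.List.pyGetD mid j 0) v) xs, k + (c : Int)) := by
  intro c
  induction c with
  | zero => intro k xs; simp [PySem.List.pyRange_one_eq_nil]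
  | succ c ih =>
    intro k xs
    have e1 : ((c : Nat) + 1 : Nat) = (c : Int) + 1 := by push_cast; ring
    rw [e1, PySem.List.pyRange_one_succ_right (by omega), List.foldl_append,
        ih k xs, ← add_assoc,
        PySem.List.pyRange_one_succ_right (a := k) (by omega), List.foldl_append]
    simp

-- shift the assignment indices into the range
theorem shift_fold (v : String) (a b off : Int) (xs : List String) :
    (PySem.List.pyRange a b 1).foldl (fun xs j => PySem.List.pySetD xs (off + j) v) xs
    = (PySem.List.pyRange (off + a) (off + b) 1).foldl
        (fun xs j => PySem.List.pySetD xs j v) xs := by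
  rw [PySem.List.pyRange_one a b, PySem.List.pyRange_one (off + a) (off + b)]
  have : off + b - (off + a) = b - a := by ring
  rw [this]
  rw [List.foldl_map, List.foldl_map]
  apply PySem.List.foldl_congr_mem
  intro acc x hx
  congr 1
  ring

-- the scan for empty slots on the three-chunk list is the middle index range
theorem mid_eq (e m l : Nat) :
    ((PySem.List.enumerate
        (List.replicate e "node0" ++ List.replicate m "" ++ List.replicate l "node0") 0).filter
      (fun p => p.2 == "")).map (·.1)
    = PySem.List.pyRange (e : Int) ((e : Int) + (m : Int)) 1 := by
  rw [PySem.List.enumerate_append, PySem.List.enumerate_append]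
  have hrep : ∀ (k : Nat) (s : Int) (w : String), (w == "") = false →
      (PySem.List.enumerate (List.replicate k w) s).filter (fun p => p.2 == "") = [] := by
    intro k
    induction k with
    | zero => intro s w hw; simp [PySem.List.enumerate_nil]
    | succ k ih =>
      intro s w hw
      rw [List.replicate_succ, PySem.List.enumerate_cons]
      simp only [List.filter_cons, hw]
      exact ih (s+1) w hw
  have hkeep : ∀ (k : Nat) (s : Int),
      (PySem.List.enumerate (List.replicate k "") s).filter (fun p => p.2 == "")
      = PySem.List.enumerate (List.replicate k "") s := by
    intro k s
    apply List.filter_eq_self.mpr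
    intro p hp
    obtain ⟨j, hj, rfl⟩ := (PySem.List.mem_enumerate_iff _ _ _).mp hp
    simp
  rw [List.filter_append, List.filter_append,
      hrep e 0 "node0" (by decide), hkeep m _, hrep l _ "node0" (by decide)]
  simp only [List.nil_append, List.append_nil]
  rw [PySem.List.map_fst_enumerate]
  simp

-- one 'for _ in range(c): xs[mid[k]] = v; k += 1' pass over the three-chunk list
theorem assign_block (e m k c : Nat) (v : String) (P S : List String)
    (hP : P.length = e + k) (hkc : k + c ≤ m) :
    (PySem.List.pyRange 0 (c : Int) 1).foldl
      (fun (st : List String × Int) _ =>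
        (PySem.List.pySetD st.1
          (PySem.List.pyGetD (PySem.List.pyRange (e : Int) ((e : Int) + (m : Int)) 1) st.2 0) v,
         st.2 + 1)) (P ++ List.replicate (m - k) "" ++ S, (k : Int))
    = (P ++ List.replicate c v ++ List.replicate (m - k - c) "" ++ S, (k : Int) + (c : Int)) := by
  rw [counter_loop]
  refine Prod.ext ?_ rfl
  simp only
  have hget : ∀ j ∈ PySem.List.pyRange (k : Int) ((k : Int) + (c : Int)) 1,
      PySem.List.pyGetD (PySem.List.pyRange (e : Int) ((e : Int) + (m : Int)) 1) j 0
      = (e : Int) + j := by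
    intro j hj
    rw [PySem.List.mem_pyRange_one] at hj
    rw [PySem.List.pyGetD_eq_getElem _ _ (by omega)
        (by rw [PySem.List.length_pyRange_one]; omega)]
    rw [PySem.List.getElem_pyRange_one]
    omega
  rw [PySem.List.foldl_congr_mem _ _
      (fun xs j => PySem.List.pySetD xs ((e : Int) + j) v) _
      (fun acc x hx => by rw [hget x hx])]
  rw [shift_fold]
  have hstart : (e : Int) + (k : Int) = (P.length : Int) := by simp [hP]
  have hend : (e : Int) + ((k : Int) + (c : Int)) = (P.length : Int) + (c : Int) := by
    simp [hP]; ring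
  rw [hstart, hend]
  have := fill_chunk v c (m - k) P S (by omega)
  rw [this]


-- A's whole list pipeline, for arbitrary block sizes summing to nn
theorem master (nn e lft c1 c2 c3 m : Nat) (h1 : e + m + lft = nn) (h2 : c1 + c2 + c3 = m) :
    (let xs1 := (PySem.List.pyRange 0 (e : Int) 1).foldl
        (fun xs i => PySem.List.pySetD xs i "node0") (List.replicate nn "");
     let xs2 := (PySem.List.pyRange ((nn : Int) - (lft : Int)) (nn : Int) 1).foldl
        (fun xs i => PySem.List.pySetD xs i "node0") xs1;
     let mid : List Int := ((PySem.List.enumerate xs2 0).filter (fun p => p.2 == "")).map (·.1);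
     let st1 := (PySem.List.pyRange 0 (c1 : Int) 1).foldl
        (fun (st : List String × Int) _ =>
          (PySem.List.pySetD st.1 (PySem.List.pyGetD mid st.2 0) "node1", st.2 + 1)) (xs2, 0);
     let st2 := (PySem.List.pyRange 0 (c2 : Int) 1).foldl
        (fun (st : List String × Int) _ =>
          (PySem.List.pySetD st.1 (PySem.List.pyGetD mid st.2 0) "node2", st.2 + 1)) st1;
     let st3 := (PySem.List.pyRange 0 (c3 : Int) 1).foldl
        (fun (st : List String × Int) _ =>
          (PySem.List.pySetD st.1 (PySem.List.pyGetD mid st.2 0) "node3", st.2 + 1)) st2;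
     st3.1)
    = List.replicate e "node0" ++ List.replicate c1 "node1" ++ List.replicate c2 "node2" ++
      List.replicate c3 "node3" ++ List.replicate lft "node0" := by
  have hxs1 : (PySem.List.pyRange 0 (e : Int) 1).foldl
      (fun xs i => PySem.List.pySetD xs i "node0") (List.replicate nn "")
      = List.replicate e "node0" ++ List.replicate (nn - e) "" := by
    have := fill_chunk "node0" e nn ([] : List String) ([] : List String) (by omega)
    simpa using this
  have hsplit : List.replicate (nn - e) ("" : String)
      = List.replicate m ("" : String) ++ List.replicate lft ("" : String) := by
    rw [← List.replicate_add]; congr 1; omega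
  have hxs2 : (PySem.List.pyRange ((nn : Int) - (lft : Int)) (nn : Int) 1).foldl
      (fun xs i => PySem.List.pySetD xs i "node0")
      (List.replicate e "node0" ++ List.replicate (nn - e) "")
      = List.replicate e "node0" ++ List.replicate m "" ++ List.replicate lft "node0" := by
    rw [hsplit, ← List.append_assoc]
    have hlen : ((nn : Int) - (lft : Int))
        = (((List.replicate e "node0" ++ List.replicate m ("" : String)).length : Nat) : Int) := by
      simp; omega
    have hlen2 : (nn : Int)
        = (((List.replicate e "node0" ++ List.replicate m ("" : String)).length : Nat) : Int)
          + (lft : Int) := by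
      simp; omega
    rw [hlen, hlen2]
    have := fill_chunk "node0" lft lft
      (List.replicate e "node0" ++ List.replicate m "") ([] : List String) le_rfl
    simp only [List.append_nil] at this
    rw [this]
    simp [List.append_assoc]
  simp only [hxs1, hxs2, mid_eq]
  have hb1 := assign_block e m 0 c1 "node1" (List.replicate e "node0")
      (List.replicate lft "node0") (by simp) (by omega)
  have hb2 := assign_block e m c1 c2 "node2"
      (List.replicate e "node0" ++ List.replicate c1 "node1")
      (List.replicate lft "node0") (by simp) (by omega)
  have hb3 := assign_block e m (c1 + c2) c3 "node3"
      (List.replicate e "node0" ++ List.replicate c1 "node1" ++ List.replicate c2 "node2")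
      (List.replicate lft "node0") (by simp) (by omega)
  simp only [List.append_assoc] at hb1 hb2 hb3 ⊢
  push_cast at hb1 hb2 hb3
  simp only [Nat.sub_zero, zero_add] at hb1
  simp only [show m - (c1 + c2) = m - c1 - c2 from by omega,
             show m - c1 - c2 - c3 = 0 from by omega] at hb3
  rw [hb1, hb2, hb3]
  simp

-- ===== VERDICT (by name: the statement is the Claim_ definition above) =====
theorem make_default_plan_spec : Claim_equal_make_default_plan := by
  intro n _ hpre
  unfold Pre_make_default_plan at hpre
  unfold Spec_make_default_plan
  obtain ⟨nn, rfl⟩ : ∃ nn : Nat, n = (nn : Int) := ⟨n.toNat, (Int.toNat_of_nonneg hpre.le).symm⟩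
  simp only [make_default_plan, make_default_plan_alt]
  have hB : PySem.Int.floordiv (nn : Int) 4 = ((nn / 4 : Nat) : Int) := by
    rw [PySem.Int.floordiv_eq_ediv_of_pos (by omega)]; omega
  have hR : PySem.Int.mod (nn : Int) 4 = ((nn % 4 : Nat) : Int) := by
    rw [PySem.Int.mod_eq_emod_of_pos (by omega)]; omega
  have hE : PySem.Int.floordiv ((nn / 4 : Nat) : Int) 2 = ((nn / 4 / 2 : Nat) : Int) := by
    rw [PySem.Int.floordiv_eq_ediv_of_pos (by omega)]; omega
  have hc1 : ((nn / 4 : Nat) : Int) + (if (1 : Int) ≤ ((nn % 4 : Nat) : Int) then (1 : Int) else 0)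
      = ((nn / 4 + (if 1 ≤ nn % 4 then 1 else 0) : Nat) : Int) := by
    by_cases h : 1 ≤ nn % 4 <;> simp [h] <;> omega
  have hc2 : ((nn / 4 : Nat) : Int) + (if (2 : Int) ≤ ((nn % 4 : Nat) : Int) then (1 : Int) else 0)
      = ((nn / 4 + (if 2 ≤ nn % 4 then 1 else 0) : Nat) : Int) := by
    by_cases h : 2 ≤ nn % 4 <;> simp [h] <;> omega
  have hc3 : ((nn / 4 : Nat) : Int) + (if (3 : Int) ≤ ((nn % 4 : Nat) : Int) then (1 : Int) else 0)
      = ((nn / 4 + (if 3 ≤ nn % 4 then 1 else 0) : Nat) : Int) := by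
    by_cases h : 3 ≤ nn % 4 <;> simp [h] <;> omega
  have hl : ((nn / 4 : Nat) : Int) - ((nn / 4 / 2 : Nat) : Int)
      = ((nn / 4 - nn / 4 / 2 : Nat) : Int) := by omega
  rw [hB, hR, hE, hc1, hc2, hc3, hl]
  simp only [PySem.List.pyRepeat_singleton, Int.toNat_natCast]
  have H := master nn (nn / 4 / 2) (nn / 4 - nn / 4 / 2)
      (nn / 4 + (if 1 ≤ nn % 4 then 1 else 0)) (nn / 4 + (if 2 ≤ nn % 4 then 1 else 0))
      (nn / 4 + (if 3 ≤ nn % 4 then 1 else 0))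
      ((nn / 4 + (if 1 ≤ nn % 4 then 1 else 0)) + (nn / 4 + (if 2 ≤ nn % 4 then 1 else 0))
        + (nn / 4 + (if 3 ≤ nn % 4 then 1 else 0)))
      (by split_ifs <;> omega) rfl
  simp only [] at H
  rw [H]
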